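-- pv_equiv track=rewrite | github.com/Vineyardcode/voynich_slop | scripts/astro_label_pipeline.py | decompose_word
-- ===== SOURCE A (Python) =====
-- SLOT_TOKENS = {
--     0:  ["q", "d", "s"],
--     1:  ["y", "o"],
--     2:  ["l", "r"],
--     3:  ["f", "p", "k", "t"],
--     4:  ["ckh", "cth", "cph", "cfh", "sch", "sh", "ch"],
--     5:  ["eee", "ee", "e"],
--     6:  ["d", "s"],
--     7:  ["a", "o"],
--     9:  ["iii", "ii", "i"],
--     10: ["iin", "in", "n", "m", "d", "l", "r"],
--     11: ["y"],
-- }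
--
-- def decompose_word(word):
--     """Slot decomposition."""
--     slots = {}
--     pos = 0
--     for slot_num in sorted(SLOT_TOKENS.keys()):
--         if pos >= len(word):
--             break
--         for token in SLOT_TOKENS[slot_num]:
--             if word[pos:].startswith(token):
--                 slots[slot_num] = token
--                 pos += len(token)
--                 break
--     remainder = word[pos:] if pos < len(word) else ""
--     return slots, remainder
-- ===== SOURCE B (Python) =====
-- import re
--
-- SLOT_TOKENS = {
--     0:  ["q", "d", "s"],
--     1:  ["y", "o"],
--     2:  ["l", "r"],
--     3:  ["f", "p", "k", "t"],
--     4:  ["ckh", "cth", "cph", "cfh", "sch", "sh", "ch"],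
--     5:  ["eee", "ee", "e"],
--     6:  ["d", "s"],
--     7:  ["a", "o"],
--     9:  ["iii", "ii", "i"],
--     10: ["iin", "in", "n", "m", "d", "l", "r"],
--     11: ["y"],
-- }
--
-- # One optional named group per slot, alternatives in the slot's token order;
-- # all groups optional and nothing follows, so the regex engine's leftmost/
-- # first-alternative rule reproduces the greedy commit-first decomposition.
-- _PATTERN = re.compile(
--     "".join(
--         "(?P<s%d>%s)?" % (n, "|".join(re.escape(t) for t in SLOT_TOKENS[n]))
--         for n in sorted(SLOT_TOKENS)
--     )
-- )
--
-- def decompose_word(word):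
--     """Slot decomposition."""
--     m = _PATTERN.match(word)
--     slots = {int(name[1:]): val
--              for name, val in m.groupdict().items() if val is not None}
--     return slots, word[m.end():]
-- ===== Notes on version B (the rewrite author's own statement) =====
-- stated objective: idiomatic
-- what changed: Replaces the hand-written nested greedy loops (outer over sorted slots, inner over tokens with break) by one compiled regex of optional named groups, matched against the word in a single engine pass; the slot dict is read off the match's groupdict and the remainder is word[m.end():].
import Mathlib
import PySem

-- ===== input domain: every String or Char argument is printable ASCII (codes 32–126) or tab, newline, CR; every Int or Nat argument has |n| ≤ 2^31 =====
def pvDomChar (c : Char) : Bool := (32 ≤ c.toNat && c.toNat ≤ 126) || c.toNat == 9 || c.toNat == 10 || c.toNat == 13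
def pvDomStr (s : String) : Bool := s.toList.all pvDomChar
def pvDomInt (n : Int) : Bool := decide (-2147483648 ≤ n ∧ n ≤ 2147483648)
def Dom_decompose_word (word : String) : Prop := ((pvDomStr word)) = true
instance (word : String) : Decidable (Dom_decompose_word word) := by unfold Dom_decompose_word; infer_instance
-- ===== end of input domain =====

-- B replaces A's hand-written nested greedy loops by one anchored regex of optional
-- named groups matched in a single engine pass (objective: idiomatic).

-- ===== PORT A =====
def pvSlotTokens : PySem.Dict Int (List String) := PySem.Dict.ofList
  [(0, ["q", "d", "s"]),
   (1, ["y", "o"]),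
   (2, ["l", "r"]),
   (3, ["f", "p", "k", "t"]),
   (4, ["ckh", "cth", "cph", "cfh", "sch", "sh", "ch"]),
   (5, ["eee", "ee", "e"]),
   (6, ["d", "s"]),
   (7, ["a", "o"]),
   (9, ["iii", "ii", "i"]),
   (10, ["iin", "in", "n", "m", "d", "l", "r"]),
   (11, ["y"])]

-- inner 'for token in SLOT_TOKENS[slot_num]: … break'
def pvAInner (word : String) (k : Int) : List String → Int → PySem.Dict Int String →
    PySem.Dict Int String × Int
  | [], pos, slots => (slots, pos)
  | t :: ts, pos, slots =>
    if PySem.Chars.startswith (PySem.List.slice word.toList (some pos) none) t.toList then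
      (slots.insert k t, pos + (PySem.Str.len t : Int))
    else pvAInner word k ts pos slots

-- outer 'for slot_num in sorted(SLOT_TOKENS.keys()): if pos >= len(word): break …'
def pvAFor (word : String) : List Int → Int → PySem.Dict Int String →
    PySem.Dict Int String × Int
  | [], pos, slots => (slots, pos)
  | k :: ks, pos, slots =>
    if (PySem.Str.len word : Int) ≤ pos then (slots, pos)
    else
      let st := pvAInner word k (pvSlotTokens.getD k []) pos slots
      pvAFor word ks st.2 st.1

def decompose_word (word : String) : (List (Int × String)) × String :=
  let st := pvAFor word (PySem.List.sorted (PySem.Dict.keys pvSlotTokens) (fun x => x) false)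
              0 PySem.Dict.empty
  (st.1.items,
   if st.2 < (PySem.Str.len word : Int) then
     String.ofList (PySem.List.slice word.toList (some st.2) none)
   else "")

-- ===== PORT B =====
-- the compiled pattern: one optional named group per slot, in sorted slot order,
-- alternatives in the slot's token order
def pvGroups : List (Int × List String) :=
  [(0, ["q", "d", "s"]),
   (1, ["y", "o"]),
   (2, ["l", "r"]),
   (3, ["f", "p", "k", "t"]),
   (4, ["ckh", "cth", "cph", "cfh", "sch", "sh", "ch"]),
   (5, ["eee", "ee", "e"]),
   (6, ["d", "s"]),
   (7, ["a", "o"]),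
   (9, ["iii", "ii", "i"]),
   (10, ["iin", "in", "n", "m", "d", "l", "r"]),
   (11, ["y"])]

-- Hand port of _PATTERN.match on this pattern shape (a sequence of OPTIONAL groups of
-- literal alternatives with nothing after them): it is EXACT because the engine takes
-- each group in order, commits to the first alternative matching at the current
-- position (or matches the group empty), and no later failure can force backtracking.
-- Returns the matched (non-None) groups in group order and the suffix after m.end().
def pvMatch : List (Int × List String) → List Char → List (Int × String) × List Char
  | [], s => ([], s)
  | (n, alts) :: gs, s =>
    match alts.find? (fun t => t.toList.isPrefixOf s) with
    | none => pvMatch gs s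
    | some t =>
      let r := pvMatch gs (s.drop t.toList.length)
      ((n, t) :: r.1, r.2)

def decompose_word_alt (word : String) : (List (Int × String)) × String :=
  let r := pvMatch pvGroups word.toList
  (r.1, String.ofList r.2)

-- ===== PRECONDITION & SPEC =====
def Spec_decompose_word (word : String) (out : (List (Int × String)) × String) : Prop := out = decompose_word_alt word
instance (word : String) (out : (List (Int × String)) × String) : Decidable (Spec_decompose_word word out) := by unfold Spec_decompose_word; infer_instance

-- ===== CLAIM (what is proved, stated in full; the proofs are below) =====
def Claim_equal_decompose_word : Prop := ∀ (word : String), Dom_decompose_word word → Spec_decompose_word word (decompose_word word)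

-- ===== LEMMAS AND PROOFS =====

-- with every token nonempty, no group matches the empty suffix
lemma pvMatch_nil (gs : List (Int × List String))
    (h : ∀ p ∈ gs, ∀ t ∈ p.2, t.toList ≠ []) : pvMatch gs [] = ([], []) := by
  induction gs with
  | nil => rfl
  | cons g gs ih =>
    obtain ⟨n, alts⟩ := g
    have hfind : alts.find? (fun t => t.toList.isPrefixOf ([] : List Char)) = none := by
      apply List.find?_eq_none.mpr
      intro t ht
      have := h (n, alts) (List.mem_cons_self) t ht
      cases hc : t.toList with
      | nil => exact absurd hc this
      | cons a l => simp [List.isPrefixOf]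
    simp only [pvMatch, hfind]
    exact ih (fun p hp t ht => h p (List.mem_cons_of_mem _ hp) t ht)

-- A's inner token loop is a first-match search over the token list
lemma pvAInner_eq (word : String) (k : Int) (alts : List String) (p : Nat)
    (slots : PySem.Dict Int String) :
    pvAInner word k alts (p : Int) slots =
      match alts.find? (fun t => t.toList.isPrefixOf (word.toList.drop p)) with
      | none => (slots, (p : Int))
      | some t => (slots.insert k t, (p : Int) + (t.toList.length : Int)) := by
  induction alts with
  | nil => rfl
  | cons t ts ih =>
    have hsw : ∀ s : List Char,
        PySem.Chars.startswith s t.toList = t.toList.isPrefixOf s := fun _ => rfl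
    simp only [pvAInner, PySem.List.slice_from_natCast, hsw, List.find?_cons]
    cases hpre : t.toList.isPrefixOf (word.toList.drop p) with
    | true => simp [PySem.Str.len_eq]
    | false => simpa using ih

-- main bridge: A's outer loop from position p does what the regex match does on the
-- suffix from p, appending the matched pairs to the dict
lemma pvAFor_eq (ks : List Int) (word : String) :
    ∀ (p : Nat) (slots : PySem.Dict Int String),
      p ≤ word.toList.length →
      ks.Nodup →
      (∀ k ∈ ks, ∀ t ∈ pvSlotTokens.getD k [], t.toList ≠ []) →
      (∀ k ∈ ks, slots.contains k = false) →
      ∃ q : Nat, p ≤ q ∧ q ≤ word.toList.length ∧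
        (pvAFor word ks (p : Int) slots).2 = (q : Int) ∧
        word.toList.drop q =
          (pvMatch (ks.map fun k => (k, pvSlotTokens.getD k [])) (word.toList.drop p)).2 ∧
        (pvAFor word ks (p : Int) slots).1.items =
          slots.items ++
            (pvMatch (ks.map fun k => (k, pvSlotTokens.getD k [])) (word.toList.drop p)).1 := by
  have hlen0 : word.toList.length = word.length := by simp
  induction ks with
  | nil =>
    intro p slots h1 _ _ _
    exact ⟨p, le_refl _, h1, rfl, rfl, by simp [pvAFor, pvMatch]⟩
  | cons k ks ih =>
    intro p slots h1 hnd htok hcon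
    by_cases hend : word.length ≤ p
    · -- pos >= len(word): A breaks; every group fails on the empty suffix
      have hp : p = word.toList.length := by omega
      have hdrop : word.toList.drop p = [] := by simp [hp]
      have hm : pvMatch ((k :: ks).map fun k => (k, pvSlotTokens.getD k []))
          (word.toList.drop p) = ([], []) := by
        rw [hdrop]
        apply pvMatch_nil
        intro pr hpr t ht
        obtain ⟨k', hk', hpr'⟩ := List.mem_map.mp hpr
        exact htok k' hk' t (by rw [← hpr'] at ht; exact ht)
      refine ⟨p, le_refl _, h1, ?_, ?_, ?_⟩
      · simp [pvAFor, PySem.Str.len_eq, hend]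
      · rw [hm, hdrop]
      · rw [hm]; simp [pvAFor, PySem.Str.len_eq, hend]
    · have hlt : p < word.toList.length := by omega
      have hstep : pvAFor word (k :: ks) (p : Int) slots =
          pvAFor word ks (pvAInner word k (pvSlotTokens.getD k []) (p : Int) slots).2
            (pvAInner word k (pvSlotTokens.getD k []) (p : Int) slots).1 := by
        simp [pvAFor, PySem.Str.len_eq, hend]
      rw [hstep, pvAInner_eq]
      cases hfind : (pvSlotTokens.getD k []).find?
          (fun t => t.toList.isPrefixOf (word.toList.drop p)) with
      | none =>
        -- the group matches empty; A's inner loop finds nothing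
        dsimp only
        obtain ⟨q, hq1, hq2, hq3, hq4, hq5⟩ := ih p slots h1 hnd.of_cons
          (fun k' hk' => htok k' (List.mem_cons_of_mem _ hk'))
          (fun k' hk' => hcon k' (List.mem_cons_of_mem _ hk'))
        refine ⟨q, hq1, hq2, hq3, ?_, ?_⟩ <;>
          simp only [List.map_cons, pvMatch, hfind] <;> assumption
      | some t =>
        dsimp only
        have hmem : t ∈ pvSlotTokens.getD k [] := List.mem_of_find?_eq_some hfind
        have hpre : t.toList.isPrefixOf (word.toList.drop p) = true := by
          have := List.find?_some hfind
          simpa using this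
        have hprefix : t.toList <+: word.toList.drop p := List.isPrefixOf_iff_prefix.mp hpre
        have hlen : t.toList.length ≤ word.toList.length - p := by
          have := hprefix.length_le
          simpa using this
        have hcast : (p : Int) + (t.toList.length : Int) = ((p + t.toList.length : Nat) : Int) := by
          push_cast; ring
        have hconk : slots.contains k = false := hcon k List.mem_cons_self
        have hcon' : ∀ k' ∈ ks, (slots.insert k t).contains k' = false := by
          intro k' hk'
          rw [PySem.Dict.contains_insert]
          have hne : k' ≠ k := by
            intro h; exact (List.nodup_cons.mp hnd).1 (h ▸ hk')
          simp [hne, hcon k' (List.mem_cons_of_mem _ hk')]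
        obtain ⟨q, hq1, hq2, hq3, hq4, hq5⟩ := ih (p + t.toList.length) (slots.insert k t)
          (by omega) hnd.of_cons
          (fun k' hk' => htok k' (List.mem_cons_of_mem _ hk'))
          hcon'
        have hdd : word.toList.drop (p + t.toList.length) =
            (word.toList.drop p).drop t.toList.length := by
          rw [List.drop_drop, Nat.add_comm]
        refine ⟨q, by omega, hq2, ?_, ?_, ?_⟩
        · rw [hcast]; exact hq3
        · simp only [List.map_cons, pvMatch, hfind]
          rw [hq4, hdd]
        · rw [hcast, hq5]
          simp only [List.map_cons, pvMatch, hfind]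
          rw [PySem.Dict.items_insert_of_not_contains (h := hconk), hdd]
          simp

-- ===== VERDICT (by name: the statement is the Claim_ definition above) =====
theorem decompose_word_spec : Claim_equal_decompose_word := by
  intro word _
  unfold Spec_decompose_word decompose_word decompose_word_alt
  have hlen0 : word.toList.length = word.length := by simp
  have hkeys : PySem.List.sorted (PySem.Dict.keys pvSlotTokens) (fun x => x) false =
      ([0, 1, 2, 3, 4, 5, 6, 7, 9, 10, 11] : List Int) := by decide
  have hmap : (([0, 1, 2, 3, 4, 5, 6, 7, 9, 10, 11] : List Int).map
      fun k => (k, pvSlotTokens.getD k [])) = pvGroups := by decide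
  obtain ⟨q, _, hq2, hq3, hq4, hq5⟩ := pvAFor_eq
    ([0, 1, 2, 3, 4, 5, 6, 7, 9, 10, 11] : List Int) word 0 PySem.Dict.empty
    (Nat.zero_le _) (by decide) (by decide) (by simp)
  rw [hkeys]
  rw [hmap] at hq4 hq5
  simp only [List.drop_zero, Nat.cast_zero] at hq3 hq4 hq5
  refine Prod.ext ?_ ?_
  · simpa using hq5
  · simp only [hq3, PySem.Str.len_eq]
    by_cases hql : q < word.toList.length
    · rw [if_pos (by exact_mod_cast hlen0 ▸ hql), PySem.List.slice_from_natCast, hq4]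
    · rw [if_neg (by exact_mod_cast hlen0 ▸ hql), ← hq4,
        show q = word.toList.length by omega, List.drop_length]
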